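-- pv_equiv track=rewrite | github.com/kristoferfannar/AOC | 2024/25/main.py | to_cmb
-- ===== SOURCE A (Python) =====
-- def to_cmb(item: list[str], breaker):
--     R = len(item)
--     C = len(item[0])
--     vals = []
--     for c in range(C):
--         val = 0
--         for r in range(1, R):
--             if item[r][c] == breaker:
--                 break
--             val += 1
--         vals.append(val)
--
--     return tuple(vals)
-- ===== SOURCE B (Python) =====
-- def to_cmb(item, breaker):
--     state = [(0, True) for _ in item[0]]
--     for row in item[1:]:
--         state = [(v + 1, True) if a and row[c] != breaker else (v, False)
--                  for c, (v, a) in enumerate(state)]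
--     return tuple(v for v, _ in state)
-- ===== Notes on version B (the rewrite author's own statement) =====
-- stated objective: alternative
-- what changed: A scans each column top-down with an inner break loop; B makes a single row-major sweep that rewrites a per-column (count, active) state list, freezing a column at its first breaker.
-- outside the precondition, e.g. on to_cmb(['ab', 'xb', 'z'], 'b'): A returns (2, 0), B returns (2, 0); on to_cmb([], 'a'): A raises IndexError, B raises IndexError
import Mathlib
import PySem

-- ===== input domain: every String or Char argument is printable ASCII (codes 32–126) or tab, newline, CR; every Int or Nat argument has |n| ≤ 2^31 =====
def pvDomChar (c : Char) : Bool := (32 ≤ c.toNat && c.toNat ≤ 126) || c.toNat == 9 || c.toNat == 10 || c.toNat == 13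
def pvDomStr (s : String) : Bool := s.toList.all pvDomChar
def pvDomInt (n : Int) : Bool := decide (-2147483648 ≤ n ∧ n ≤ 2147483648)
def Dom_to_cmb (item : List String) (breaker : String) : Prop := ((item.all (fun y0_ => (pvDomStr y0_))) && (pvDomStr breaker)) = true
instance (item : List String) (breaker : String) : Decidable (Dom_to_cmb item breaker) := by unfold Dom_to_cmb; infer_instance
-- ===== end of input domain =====

-- B replaces A's column-major scan-until-break (nested loops with `break`) by a single row-major
-- sweep over the rows that rewrites a per-column (count, active) state list; alternative
-- decomposition, same O(R*C) cost.

-- ===== PORT A =====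
-- inner loop `for r in range(1, R): if item[r][c] == breaker: break; val += 1`
def pvInnerA (item : List String) (bl : List Char) (c : Int) : List Int → Int
  | [] => 0
  | r :: rs =>
    match PySem.Str.pyGet? (PySem.List.pyGetD item r "") c with
    | some ch => if [ch] = bl then 0 else 1 + pvInnerA item bl c rs
    | none => 0    -- IndexError in Python; excluded by Pre_

def to_cmb (item : List String) (breaker : String) : List Int :=
  let R : Int := item.length
  let C : Int := PySem.Str.len (PySem.List.pyGetD item 0 "")
  (PySem.List.pyRange 0 C 1).map (fun c => pvInnerA item breaker.toList c (PySem.List.pyRange 1 R 1))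

-- ===== PORT B =====
-- one comprehension step: state = [(v+1, True) if a and row[c] != breaker else (v, False) for c, (v, a) in enumerate(state)]
def pvStepB (bl : List Char) (row : String) (st : List (Int × Bool)) : List (Int × Bool) :=
  (PySem.List.enumerate st).map (fun p =>
    if p.2.2 ∧ ¬ ([(PySem.Str.pyGet? row p.1).getD ' '] = bl) then (p.2.1 + 1, true) else (p.2.1, false))

def to_cmb_alt (item : List String) (breaker : String) : List Int :=
  let st0 : List (Int × Bool) := (PySem.List.pyGetD item 0 "").toList.map (fun _ => ((0 : Int), true))
  let st := (PySem.List.slice item (some 1) none).foldl (fun st row => pvStepB breaker.toList row st) st0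
  st.map (fun p => p.1)

-- ===== PRECONDITION & SPEC =====
-- Pre_ excludes the empty list (A raises IndexError on item[0]) and ragged inputs where some later
-- row is shorter than the first row: on those A usually raises IndexError, but may still return when
-- every affected column hits the breaker before the short row — B returns the same value there too
-- (see cites), so Pre_ is merely narrower than its reason, never hiding a disagreement.
def Pre_to_cmb (item : List String) (breaker : String) : Prop :=
  item ≠ [] ∧ ∀ row ∈ item.tail, PySem.Str.len (item.headD "") ≤ PySem.Str.len row

instance (item : List String) (breaker : String) : Decidable (Pre_to_cmb item breaker) := by
  unfold Pre_to_cmb; infer_instance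

def pvWitness_to_cmb : List String × String := (["#.#", ".##", "..#"], "#")

def Spec_to_cmb (item : List String) (breaker : String) (out : List Int) : Prop := out = to_cmb_alt item breaker
instance (item : List String) (breaker : String) (out : List Int) : Decidable (Spec_to_cmb item breaker out) := by unfold Spec_to_cmb; infer_instance

-- ===== CLAIM (what is proved, stated in full; the proofs are below) =====
def Claim_equal_to_cmb : Prop := ∀ (item : List String) (breaker : String), Dom_to_cmb item breaker → Pre_to_cmb item breaker → Spec_to_cmb item breaker (to_cmb item breaker)

-- ===== LEMMAS AND PROOFS =====

-- column-c count as a structural recursion over the row list (reference form both sides reach)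
def pvColA (bl : List Char) (c : Int) : List String → Int
  | [] => 0
  | row :: rs =>
    match PySem.Str.pyGet? row c with
    | some ch => if [ch] = bl then 0 else 1 + pvColA bl c rs
    | none => 0

-- per-column step of B
def pvStep1 (bl : List Char) (row : String) (c : Int) (s : Int × Bool) : Int × Bool :=
  if s.2 ∧ ¬ ([(PySem.Str.pyGet? row c).getD ' '] = bl) then (s.1 + 1, true) else (s.1, false)

lemma pvInnerA_eq_colA (item : List String) (bl : List Char) (c : Int) :
    ∀ k : Nat, k ≤ item.length →
      pvInnerA item bl c (PySem.List.pyRange k item.length 1) = pvColA bl c (item.drop k) := by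
  intro k hk
  induction hn : item.length - k generalizing k with
  | zero =>
      have hk' : k = item.length := by omega
      subst hk'
      rw [PySem.List.pyRange_one_eq_nil (by omega)]
      simp [pvInnerA, pvColA, List.drop_of_length_le]
  | succ n ih =>
      have hlt : k < item.length := by omega
      rw [PySem.List.pyRange_one_cons (by exact_mod_cast hlt)]
      have hdrop : item.drop k = item[k] :: item.drop (k + 1) := by
        rw [List.drop_eq_getElem_cons hlt]
      rw [hdrop]
      have hget : PySem.List.pyGetD item (k : Int) "" = item[k] := by
        rw [PySem.List.pyGetD_natCast, List.getD_eq_getElem?_getD, List.getElem?_eq_getElem hlt]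
        rfl
      have ih' := ih (k + 1) (by omega) (by omega)
      simp only [pvInnerA, pvColA, hget]
      have : ((k : Int) + 1) = ((k + 1 : Nat) : Int) := by push_cast; ring
      rw [this, ih']

-- a frozen column never changes again
lemma pvStep1_frozen (bl : List Char) (c : Int) (v : Int) (rows : List String) :
    rows.foldl (fun s row => pvStep1 bl row c s) (v, false) = (v, false) := by
  induction rows with
  | nil => rfl
  | cons row rs ih =>
      rw [List.foldl_cons]
      have h1 : pvStep1 bl row c (v, false) = (v, false) := by simp [pvStep1]
      rw [h1, ih]

-- break-vs-flag: while the cell reads are in range, B's per-column fold computes A's count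
lemma pvStep1_run (bl : List Char) (c : Nat) (rows : List String)
    (h : ∀ row ∈ rows, c < row.toList.length) (v : Int) :
    (rows.foldl (fun s row => pvStep1 bl row (c : Int) s) (v, true)).1
      = v + pvColA bl (c : Int) rows := by
  induction rows generalizing v with
  | nil => simp [pvColA]
  | cons row rs ih =>
      have hc : c < row.toList.length := h row (by simp)
      have hsome : PySem.Str.pyGet? row (c : Int) = some row.toList[c] := by
        rw [PySem.Str.pyGet?_natCast, List.getElem?_eq_getElem hc]
      by_cases hb : [row.toList[c]] = bl
      · rw [List.foldl_cons]
        have h1 : pvStep1 bl row (c : Int) (v, true) = (v, false) := by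
          simp [pvStep1, List.getElem?_eq_getElem hc, hb]
        rw [h1, pvStep1_frozen]
        simp only [pvColA]
        rw [hsome]
        simp [hb]
      · rw [List.foldl_cons]
        have h1 : pvStep1 bl row (c : Int) (v, true) = (v + 1, true) := by
          simp [pvStep1, List.getElem?_eq_getElem hc, hb]
        rw [h1, ih (fun r hr => h r (by simp [hr])) (v + 1)]
        simp only [pvColA]
        rw [hsome]
        simp only [if_neg hb]
        ring

-- B's comprehension over enumerate, on a state list of the shape (range' s C).map f
lemma pvEnum_run (bl : List Char) (row : String) (f : Nat → Int × Bool) :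
    ∀ (C s : Nat),
      (PySem.List.enumerate ((List.range' s C).map f) (s : Int)).map (fun p =>
        if p.2.2 ∧ ¬ ([(PySem.Str.pyGet? row p.1).getD ' '] = bl) then (p.2.1 + 1, true) else (p.2.1, false))
      = (List.range' s C).map (fun c : Nat => pvStep1 bl row (c : Int) (f c)) := by
  intro C
  induction C with
  | zero => intro s; rfl
  | succ n ih =>
      intro s
      have hcast : ((s : Int) + 1) = ((s + 1 : Nat) : Int) := by push_cast; ring
      rw [List.range'_succ, List.map_cons, PySem.List.enumerate_cons, List.map_cons, hcast, ih (s + 1)]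
      simp [pvStep1]

lemma pvStepB_on_range (bl : List Char) (row : String) (f : Nat → Int × Bool) (C : Nat) :
    pvStepB bl row ((List.range' 0 C).map f) =
      (List.range' 0 C).map (fun c : Nat => pvStep1 bl row (c : Int) (f c)) := by
  have h := pvEnum_run bl row f C 0
  simpa [pvStepB] using h

lemma pvFold_on_range (bl : List Char) (rows : List String) (C : Nat) :
    ∀ f : Nat → Int × Bool,
      rows.foldl (fun st row => pvStepB bl row st) ((List.range' 0 C).map f) =
        (List.range' 0 C).map (fun c : Nat => rows.foldl (fun s row => pvStep1 bl row (c : Int) s) (f c)) := by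
  induction rows with
  | nil => intro f; rfl
  | cons row rs ih =>
      intro f
      rw [List.foldl_cons, pvStepB_on_range, ih (fun c => pvStep1 bl row (c : Int) (f c))]
      simp

-- ===== VERDICT (by name: the statement is the Claim_ definition above) =====
theorem to_cmb_spec : Claim_equal_to_cmb := by
  intro item breaker _dom hpre
  obtain ⟨hne, hlen⟩ := hpre
  obtain ⟨i0, rest, rfl⟩ : ∃ i0 rest, item = i0 :: rest := by
    cases item with
    | nil => exact absurd rfl hne
    | cons a l => exact ⟨a, l, rfl⟩
  unfold Spec_to_cmb to_cmb to_cmb_alt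
  set bl := breaker.toList
  set Cn := i0.toList.length with hCn
  -- A side
  have hC : PySem.Str.len (PySem.List.pyGetD (i0 :: rest) 0 "") = (Cn : Int) := by
    rw [PySem.List.pyGetD_zero_cons, PySem.Str.len_eq]
  have hA : (PySem.List.pyRange 0 (PySem.Str.len (PySem.List.pyGetD (i0 :: rest) 0 "")) 1).map
        (fun c => pvInnerA (i0 :: rest) bl c (PySem.List.pyRange 1 ((i0 :: rest).length : Int) 1))
      = (List.range Cn).map (fun c : Nat => pvColA bl (c : Int) rest) := by
    rw [hC, PySem.List.pyRange_zero_nat, List.map_map]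
    refine List.map_congr_left (fun c _ => ?_)
    have h1 := pvInnerA_eq_colA (i0 :: rest) bl (c : Int) 1 (by simp)
    simp only [Nat.cast_one] at h1
    simp only [Function.comp_apply, h1, List.drop_one, List.tail_cons]
  -- B side
  have hst0 : i0.toList.map (fun _ => ((0 : Int), true)) =
      (List.range' 0 Cn).map (fun _ => ((0 : Int), true)) := by
    rw [List.map_const', List.map_const', List.length_range']
  have hrows : PySem.List.slice (i0 :: rest) (some 1) none = rest := by
    rw [PySem.List.slice_from_one, List.tail_cons]
  rw [hA]
  simp only [PySem.List.pyGetD_zero_cons, hrows, hst0]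
  rw [pvFold_on_range bl rest Cn (fun _ => ((0 : Int), true)), List.map_map]
  rw [List.range_eq_range']
  refine List.map_congr_left (fun c hc => ?_)
  have hcC : c < Cn := by
    have := List.mem_range'_1.mp hc; omega
  have hread : ∀ row ∈ rest, c < row.toList.length := by
    intro row hrow
    have := hlen row (by simpa using hrow)
    simp only [List.headD_cons, PySem.Str.len_eq] at this
    have : Cn ≤ row.toList.length := by exact_mod_cast this
    omega
  simpa using (pvStep1_run bl c rest hread 0).symm
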